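-- pv_equiv track=rewrite | github.com/600612155/smc_proj | Type_Code.py | sign_extend
-- ===== SOURCE A (Python) =====
-- def sign_extend(value, bits):
--     if len(value) <= bits :
--         x = list(value)
--         if x[0] == "0":
--             for n in range(bits - len(value)) :
--                 value = "0" + value
--         else:
--             for n in range(bits - len(value)) :
--                 value = "1" + value
--     return value
-- ===== SOURCE B (Python) =====
-- def sign_extend(value, bits):
--     if len(value) <= bits:
--         fill = '0' if value[0] == '0' else '1'
--         return fill * (bits - len(value)) + value
--     return value
-- ===== Notes on version B (the rewrite author's own statement) =====
-- stated objective: simpler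
-- what changed: Replaces the one-character-at-a-time prepend loop with a single closed-form string multiplication fill * (bits - len(value)).
import Mathlib
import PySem

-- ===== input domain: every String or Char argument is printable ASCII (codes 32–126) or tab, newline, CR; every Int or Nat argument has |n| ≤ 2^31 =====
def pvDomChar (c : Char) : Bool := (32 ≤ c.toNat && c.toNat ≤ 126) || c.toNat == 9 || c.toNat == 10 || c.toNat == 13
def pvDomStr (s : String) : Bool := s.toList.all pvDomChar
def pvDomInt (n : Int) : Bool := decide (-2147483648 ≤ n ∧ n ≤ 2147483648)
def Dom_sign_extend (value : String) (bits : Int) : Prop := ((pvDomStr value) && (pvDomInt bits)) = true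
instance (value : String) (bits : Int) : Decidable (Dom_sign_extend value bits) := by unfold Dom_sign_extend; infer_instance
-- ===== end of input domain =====

-- B replaces A's one-bit-at-a-time prepend loop by a closed-form `fill * (bits - len(value))` pad (simpler).

-- ===== PORT A =====
-- A: if len(value) <= bits, inspect value[0] (IndexError on "" — excluded by Pre_),
-- then prepend "0" or "1" once per range(bits - len(value)) iteration.
def sign_extend (value : String) (bits : Int) : String :=
  let l := value.toList
  if (l.length : Int) ≤ bits then
    match PySem.List.pyGet? l 0 with
    | none => value  -- Python raises IndexError here; outside Pre_
    | some c =>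
      if c = '0' then
        String.ofList ((PySem.List.pyRange 0 (bits - l.length) 1).foldl (fun acc _ => '0' :: acc) l)
      else
        String.ofList ((PySem.List.pyRange 0 (bits - l.length) 1).foldl (fun acc _ => '1' :: acc) l)
  else value

-- ===== PORT B =====
-- B: same guard and value[0] inspection, then a single replicate pad.
def sign_extend_alt (value : String) (bits : Int) : String :=
  let l := value.toList
  if (l.length : Int) ≤ bits then
    match PySem.List.pyGet? l 0 with
    | none => value  -- Python raises IndexError here; outside Pre_
    | some c =>
      let fill := if c = '0' then '0' else '1'
      String.ofList (List.replicate (bits - l.length).toNat fill ++ l)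
  else value

-- ===== PRECONDITION & SPEC =====
-- Pre_ excludes exactly the inputs where A (and B alike) raises IndexError: empty value with 0 ≤ bits.
def Pre_sign_extend (value : String) (bits : Int) : Prop := ¬ (value = "" ∧ 0 ≤ bits)
instance (value : String) (bits : Int) : Decidable (Pre_sign_extend value bits) := by unfold Pre_sign_extend; infer_instance
def pvWitness_sign_extend : String × Int := ("101", 8)

def Spec_sign_extend (value : String) (bits : Int) (out : String) : Prop := out = sign_extend_alt value bits
instance (value : String) (bits : Int) (out : String) : Decidable (Spec_sign_extend value bits out) := by unfold Spec_sign_extend; infer_instance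

-- ===== CLAIM (what is proved, stated in full; the proofs are below) =====
def Claim_equal_sign_extend : Prop := ∀ (value : String) (bits : Int), Dom_sign_extend value bits → Pre_sign_extend value bits → Spec_sign_extend value bits (sign_extend value bits)

-- ===== LEMMAS AND PROOFS =====

-- ===== VERDICT (by name: the statement is the Claim_ definition above) =====
theorem sign_extend_spec : Claim_equal_sign_extend := by
  intro value bits _ hpre
  unfold Spec_sign_extend sign_extend sign_extend_alt
  by_cases hle : ((value.toList.length : Int) ≤ bits)
  · rw [if_pos hle, if_pos hle]
    cases hget : PySem.List.pyGet? value.toList 0 with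
    | none =>
        exfalso
        have hnil : value.toList = [] := by
          cases h : value.toList with
          | nil => rfl
          | cons c cs => simp [h, PySem.List.pyGet?, PySem.List.pyIdx?] at hget
        apply hpre
        refine ⟨by simpa using congrArg String.ofList hnil, ?_⟩
        have := hle; rw [hnil] at this; simpa using this
    | some c =>
        by_cases hc : c = '0'
        · simp [hc, PySem.List.length_pyRange_one]
        · simp [hc, PySem.List.length_pyRange_one]
  · rw [if_neg hle, if_neg hle]
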